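-- pv_equiv track=rewrite | github.com/swe-students-spring2026/3-package-giant_anteater | anteater_tools/regex_to_string/regex_to_string.py | _parse_char_class
-- ===== SOURCE A (Python) =====
-- SPECIAL_REGEX_CHARS = set(".^$*+?{}[]\\|()")
--
-- def _parse_char_class(content: str) -> list[str]:
--     chars = []
--     i = 0
--
--     while i < len(content):
--         if i + 2 < len(content) and content[i + 1] == "-":
--             start = content[i]
--             end = content[i + 2]
--             chars.extend(chr(code) for code in range(ord(start), ord(end) + 1))
--             i += 3
--         else:
--             chars.append(content[i])
--             i += 1
--
--     filtered = [ch for ch in chars if ch not in SPECIAL_REGEX_CHARS]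
--     return filtered
-- ===== SOURCE B (Python) =====
-- SPECIAL_REGEX_CHARS = set(".^$*+?{}[]\\|()")
--
-- def _parse_char_class(content):
--     # One-pass buffered state machine (no index arithmetic, no lookahead,
--     # no separate filtering pass): `pending` holds at most two not-yet-decided
--     # characters; a third char resolves it as a range or emits the first char.
--     out = []
--     pending = []
--     for c in content:
--         if len(pending) == 2:
--             if pending[1] == "-":
--                 out.extend(chr(k) for k in range(ord(pending[0]), ord(c) + 1)
--                            if chr(k) not in SPECIAL_REGEX_CHARS)
--                 pending = []
--             else:
--                 if pending[0] not in SPECIAL_REGEX_CHARS: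
--                     out.append(pending[0])
--                 pending = [pending[1], c]
--         else:
--             pending.append(c)
--     for c in pending:
--         if c not in SPECIAL_REGEX_CHARS:
--             out.append(c)
--     return out
-- ===== Notes on version B (the rewrite author's own statement) =====
-- stated objective: alternative
-- what changed: Replaces A's indexed while-loop with three-character lookahead plus a separate final filtering pass by a single buffered state-machine pass over the characters (a pending buffer of at most two undecided chars resolves each range or single char), filtering inline as it emits. Mechanism: direct iteration over the string removes per-step len() calls and repeated subscripting by int index.
import Mathlib
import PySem

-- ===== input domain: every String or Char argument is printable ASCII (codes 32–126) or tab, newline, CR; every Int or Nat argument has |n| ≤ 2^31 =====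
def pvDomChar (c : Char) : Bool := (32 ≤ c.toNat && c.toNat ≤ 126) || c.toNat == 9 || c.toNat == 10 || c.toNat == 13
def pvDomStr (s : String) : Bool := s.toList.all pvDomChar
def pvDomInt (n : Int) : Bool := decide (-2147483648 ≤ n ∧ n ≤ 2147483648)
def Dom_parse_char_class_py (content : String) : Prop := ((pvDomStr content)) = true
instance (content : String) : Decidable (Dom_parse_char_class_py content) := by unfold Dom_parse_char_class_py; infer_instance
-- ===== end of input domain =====

-- B replaces A's indexed lookahead loop + separate filter pass by a single buffered
-- state-machine pass (objective: alternative decomposition, same cost).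

-- shared small helpers (exact on the ASCII domain)
def specialChars : List Char := ['.', '^', '$', '*', '+', '?', '{', '}', '[', ']', '\\', '|', '(', ')']
def notSpecial (c : Char) : Bool := !(specialChars.contains c)
def mkStr (c : Char) : String := String.ofList [c]
-- chr(code) for code in range(ord a, ord b + 1)
def rangeChars (a b : Char) : List Char := (List.range' a.toNat (b.toNat + 1 - a.toNat)).map Char.ofNat

-- ===== PORT A =====
-- the while-loop over cursor i, building `chars` then filtering
def aLoop (s : List Char) (i : Nat) : List Char :=
  if i < s.length then
    if i + 2 < s.length ∧ s.getD (i + 1) ' ' = '-' then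
      rangeChars (s.getD i ' ') (s.getD (i + 2) ' ') ++ aLoop s (i + 3)
    else
      s.getD i ' ' :: aLoop s (i + 1)
  else []
termination_by s.length - i
decreasing_by all_goals omega

def parse_char_class_py (content : String) : List String :=
  ((aLoop content.toList 0).filter notSpecial).map mkStr

-- ===== PORT B =====
-- filtered expansion of a resolved range / single char
def rangeStrings (a b : Char) : List String := ((rangeChars a b).filter notSpecial).map mkStr
def emit1 (c : Char) : List String := if notSpecial c then [mkStr c] else []

def bStep (st : List String × List Char) (c : Char) : List String × List Char :=
  match st with
  | (out, [a, m]) =>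
      if m = '-' then (out ++ rangeStrings a c, [])
      else (out ++ emit1 a, [m, c])
  | (out, p) => (out, p ++ [c])

def parse_char_class_py_alt (content : String) : List String :=
  let st := content.toList.foldl bStep ([], [])
  st.1 ++ (st.2.filter notSpecial).map mkStr

-- ===== PRECONDITION & SPEC =====
def Spec_parse_char_class_py (content : String) (out : List String) : Prop := out = parse_char_class_py_alt content
instance (content : String) (out : List String) : Decidable (Spec_parse_char_class_py content out) := by unfold Spec_parse_char_class_py; infer_instance

-- ===== CLAIM (what is proved, stated in full; the proofs are below) =====
def Claim_equal_parse_char_class_py : Prop := ∀ (content : String), Dom_parse_char_class_py content → Spec_parse_char_class_py content (parse_char_class_py content)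

-- ===== LEMMAS AND PROOFS =====

-- common reference: greedy lookahead expansion, filtered inline
def eExpand : List Char → List String
  | c1 :: c2 :: c3 :: rest =>
      if c2 = '-' then rangeStrings c1 c3 ++ eExpand rest
      else emit1 c1 ++ eExpand (c2 :: c3 :: rest)
  | c :: rest => emit1 c ++ eExpand rest
  | [] => []

theorem filter_map_cons (c : Char) (t : List Char) :
    ((c :: t).filter notSpecial).map mkStr = emit1 c ++ (t.filter notSpecial).map mkStr := by
  by_cases h : notSpecial c = true <;> simp [h, emit1]

theorem b_fold (l : List Char) : ∀ (out : List String) (p : List Char), p.length ≤ 2 →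
    (l.foldl bStep (out, p)).1 ++ (((l.foldl bStep (out, p)).2).filter notSpecial).map mkStr
      = out ++ eExpand (p ++ l) := by
  induction l with
  | nil =>
      intro out p hp
      match p, hp with
      | [], _ => simp [eExpand]
      | [a], _ => simp [eExpand, filter_map_cons]
      | [a, b], _ => simp [eExpand, filter_map_cons]
  | cons c l ih =>
      intro out p hp
      match p, hp with
      | [], _ =>
          simpa using ih out [c] (by simp)
      | [a], _ =>
          simpa using ih out [a, c] (by simp)
      | [a, m], _ =>
          by_cases hm : m = '-'
          · subst hm
            simp only [List.foldl_cons, bStep, if_true]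
            rw [ih (out ++ rangeStrings a c) [] (by simp)]
            simp [eExpand]
          · simp only [List.foldl_cons, bStep, if_neg hm]
            rw [ih (out ++ emit1 a) [m, c] (by simp)]
            simp [eExpand, hm]

theorem a_loop (s : List Char) : ∀ (n i : Nat), s.length - i ≤ n →
    ((aLoop s i).filter notSpecial).map mkStr = eExpand (s.drop i) := by
  intro n
  induction n with
  | zero =>
      intro i h
      rw [aLoop]
      rw [if_neg (by omega), List.drop_eq_nil_of_le (by omega)]
      simp [eExpand]
  | succ n ih =>
      intro i h
      rw [aLoop]
      by_cases hi : i < s.length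
      · rw [if_pos hi]
        by_cases hc : i + 2 < s.length ∧ s.getD (i + 1) ' ' = '-'
        · rw [if_pos hc]
          obtain ⟨h2, hdash⟩ := hc
          rw [List.drop_eq_getElem_cons (by omega : i < s.length),
              List.drop_eq_getElem_cons (by omega : i + 1 < s.length),
              List.drop_eq_getElem_cons (by omega : i + 2 < s.length)]
          rw [List.getD_eq_getElem s ' ' (by omega : i + 1 < s.length)] at hdash
          rw [eExpand, if_pos hdash]
          rw [List.filter_append, List.map_append]
          rw [ih (i + 3) (by omega)]
          rw [List.getD_eq_getElem s ' ' (by omega : i < s.length),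
              List.getD_eq_getElem s ' ' (by omega : i + 2 < s.length)]
          rfl
        · rw [if_neg hc]
          rw [List.getD_eq_getElem s ' ' hi]
          rw [List.drop_eq_getElem_cons hi, filter_map_cons, ih (i + 1) (by omega)]
          by_cases h2 : i + 2 < s.length
          · have hdash : s[i + 1]'(by omega) ≠ '-' := by
              intro hd
              exact hc ⟨h2, by rw [List.getD_eq_getElem s ' ' (by omega : i + 1 < s.length)]; exact hd⟩
            rw [List.drop_eq_getElem_cons (by omega : i + 1 < s.length),
                List.drop_eq_getElem_cons (by omega : i + 2 < s.length)]
            rw [eExpand, if_neg hdash]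
          · -- fewer than two chars remain after position i
            have hlen : (s.drop (i + 1)).length ≤ 1 := by
              simp [List.length_drop]; omega
            match hdd : s.drop (i + 1), hlen with
            | [], _ => simp [eExpand]
            | [a], _ => simp [eExpand]
      · rw [if_neg hi, List.drop_eq_nil_of_le (by omega)]
        simp [eExpand]

-- ===== VERDICT (by name: the statement is the Claim_ definition above) =====
theorem parse_char_class_py_spec : Claim_equal_parse_char_class_py := by
  intro content _
  show _ = _
  rw [parse_char_class_py, parse_char_class_py_alt]
  rw [a_loop content.toList content.toList.length 0 (by omega)]
  rw [b_fold content.toList [] [] (by simp)]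
  simp
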